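-- pv_equiv track=rewrite | github.com/arrat-tools/infrastructure | arrat_scripts/code/lib/lib_event_extraction.py | since_thresh
-- ===== SOURCE A (Python) =====
-- def since_thresh(x, val_thresh, age_thresh):
--     init = False
--     state, age = [], []
--     for i in range(0, len(x)):
--         if x[i] > val_thresh:
--             i_last_bad = i
--             init = True
--         if not init:
--             age.append(-1)
--             state.append(1)
--         else:
--             if i-i_last_bad >= age_thresh:
--                 this_state = 1
--             else:
--                 this_state = 0
--             age.append(i-i_last_bad)
--             state.append(this_state)
--     return age, state
-- ===== SOURCE B (Python) =====
-- def since_thresh(x, val_thresh, age_thresh):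
--     # Segment-based: collect the crossing indices once, then build the age list
--     # by concatenating whole segments (a -1 prefix before the first crossing and
--     # a counted-up run after each crossing); the state list is mapped from age.
--     n = len(x)
--     idxs = [i for i, v in enumerate(x) if v > val_thresh]
--     if not idxs:
--         return [-1] * n, [1] * n
--     age = [-1] * idxs[0]
--     for j, k in zip(idxs, idxs[1:]):
--         age.extend(range(k - j))
--     age.extend(range(n - idxs[-1]))
--     state = [1 if (a == -1 or a >= age_thresh) else 0 for a in age]
--     return age, state
-- ===== Notes on version B (the rewrite author's own statement) =====
-- stated objective: alternative
-- what changed: A walks element-by-element tracking an init flag and the last bad index; B first extracts the list of crossing indices, then builds the age list segment-by-segment (a -1 prefix, then a counted-up run per inter-crossing segment) and maps the state list from the age list.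
import Mathlib
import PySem

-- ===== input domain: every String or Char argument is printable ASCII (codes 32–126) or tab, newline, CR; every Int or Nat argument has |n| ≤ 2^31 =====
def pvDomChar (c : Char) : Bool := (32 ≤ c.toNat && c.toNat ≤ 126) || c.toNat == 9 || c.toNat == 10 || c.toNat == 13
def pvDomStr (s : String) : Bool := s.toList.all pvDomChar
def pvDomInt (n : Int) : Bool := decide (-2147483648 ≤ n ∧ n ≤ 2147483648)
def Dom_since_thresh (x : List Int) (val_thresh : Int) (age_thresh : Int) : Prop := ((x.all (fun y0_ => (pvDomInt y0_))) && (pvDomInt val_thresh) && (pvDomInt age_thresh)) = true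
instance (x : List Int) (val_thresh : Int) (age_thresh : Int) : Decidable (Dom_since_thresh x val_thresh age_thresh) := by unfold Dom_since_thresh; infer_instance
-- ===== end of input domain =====

-- B replaces A's element-by-element loop (init flag + last-bad-index tracking) by a
-- segment construction: extract the crossing indices once, build the age list segment by
-- segment, map the state list from it — an alternative decomposition, same cost.

-- ===== PORT A =====
-- loop state: (init, i_last_bad, age, state); i_last_bad starts as a dummy 0, only read once init
def stepA (x : List Int) (val_thresh age_thresh : Int)
    (st : Bool × Int × List Int × List Int) (i : Int) : Bool × Int × List Int × List Int :=
  let (init, ilb, age, state) := st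
  let xi := PySem.List.pyGetD x i 0   -- x[i]; i ∈ range(len(x)) is always in range, so exact
  let init' := if xi > val_thresh then true else init
  let ilb' := if xi > val_thresh then i else ilb
  if !init' then (init', ilb', age ++ [-1], state ++ [1])
  else
    let this_state : Int := if i - ilb' ≥ age_thresh then 1 else 0
    (init', ilb', age ++ [i - ilb'], state ++ [this_state])

def since_thresh (x : List Int) (val_thresh : Int) (age_thresh : Int) : List Int × List Int :=
  let r := (PySem.List.pyRange 0 (x.length : Int) 1).foldl (stepA x val_thresh age_thresh)
            (false, 0, [], [])
  (r.2.2.1, r.2.2.2)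

-- ===== PORT B =====
def since_thresh_alt (x : List Int) (val_thresh : Int) (age_thresh : Int) : List Int × List Int :=
  let n : Int := x.length
  -- idxs = [i for i, v in enumerate(x) if v > val_thresh]
  let idxs : List Int := (PySem.List.enumerate x).filterMap
    (fun iv => if iv.2 > val_thresh then some iv.1 else none)
  match idxs with
  | [] => (List.replicate x.length (-1), List.replicate x.length 1)   -- [-1]*n, [1]*n
  | i0 :: _ =>
    let age0 := List.replicate i0.toNat (-1)                          -- [-1]*idxs[0] (i0 ≥ 0)
    -- for j, k in zip(idxs, idxs[1:]): age.extend(range(k - j))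
    let age1 := (List.zip idxs (PySem.List.slice idxs (some 1) none)).foldl
      (fun acc jk => acc ++ PySem.List.pyRange 0 (jk.2 - jk.1) 1) age0
    -- age.extend(range(n - idxs[-1]))
    let age := age1 ++ PySem.List.pyRange 0 (n - PySem.List.pyGetD idxs (-1) 0) 1
    (age, age.map (fun a => if a = -1 ∨ a ≥ age_thresh then 1 else 0))

-- ===== PRECONDITION & SPEC =====
def Spec_since_thresh (x : List Int) (val_thresh : Int) (age_thresh : Int) (out : List Int × List Int) : Prop := out = since_thresh_alt x val_thresh age_thresh
instance (x : List Int) (val_thresh : Int) (age_thresh : Int) (out : List Int × List Int) : Decidable (Spec_since_thresh x val_thresh age_thresh out) := by unfold Spec_since_thresh; infer_instance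

-- ===== CLAIM (what is proved, stated in full; the proofs are below) =====
def Claim_equal_since_thresh : Prop := ∀ (x : List Int) (val_thresh : Int) (age_thresh : Int), Dom_since_thresh x val_thresh age_thresh → Spec_since_thresh x val_thresh age_thresh (since_thresh x val_thresh age_thresh)

-- ===== LEMMAS AND PROOFS =====

-- proof-side names for the pieces of B
def idxsOf (x : List Int) (vt : Int) : List Int :=
  (PySem.List.enumerate x).filterMap (fun iv => if iv.2 > vt then some iv.1 else none)

def segAge (n : Nat) (L : List Int) : List Int :=
  match L with
  | [] => List.replicate n (-1)
  | i0 :: _ =>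
    ((List.zip L L.tail).foldl
      (fun acc jk => acc ++ PySem.List.pyRange 0 (jk.2 - jk.1) 1)
      (List.replicate i0.toNat (-1)))
      ++ PySem.List.pyRange 0 ((n : Int) - PySem.List.pyGetD L (-1) 0) 1

theorem alt_eq (x : List Int) (vt at' : Int) :
    since_thresh_alt x vt at'
      = (segAge x.length (idxsOf x vt),
         (segAge x.length (idxsOf x vt)).map (fun a => if a = -1 ∨ a ≥ at' then 1 else 0)) := by
  simp only [since_thresh_alt, PySem.List.slice_from_one]
  unfold idxsOf
  cases hL : (PySem.List.enumerate x).filterMap (fun iv => if iv.2 > vt then some iv.1 else none) with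
  | nil => simp [segAge]
  | cons i0 rest => simp only [segAge]

theorem idxsOf_append (x : List Int) (v vt : Int) :
    idxsOf (x ++ [v]) vt
      = idxsOf x vt ++ (if v > vt then [(x.length : Int)] else []) := by
  unfold idxsOf
  rw [PySem.List.enumerate_append, List.filterMap_append]
  by_cases hv : v > vt <;> simp [PySem.List.enumerate_cons, hv]

theorem pairs_append (l : List Int) (m : Int) (h : l ≠ []) :
    List.zip (l ++ [m]) (l ++ [m]).tail
      = List.zip l l.tail ++ [(PySem.List.pyGetD l (-1) 0, m)] := by
  induction l with
  | nil => exact absurd rfl h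
  | cons a l ih =>
    cases l with
    | nil => simp [PySem.List.pyGetD_neg_one]
    | cons b l =>
      have := ih (by simp)
      simp only [List.cons_append, List.tail_cons, List.zip_cons_cons] at this ⊢
      rw [this]
      congr 2
      rw [PySem.List.pyGetD_neg_one (xs := a :: b :: l) (h := by simp),
          PySem.List.pyGetD_neg_one (xs := b :: l) (h := by simp)]
      simp [List.getLast_cons]

theorem pyGetD_append_left (xs : List Int) (v : Int) (i : Int) (h0 : 0 ≤ i)
    (h1 : i < (xs.length : Int)) :
    PySem.List.pyGetD (xs ++ [v]) i 0 = PySem.List.pyGetD xs i 0 := by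
  rw [PySem.List.pyGetD_eq_getElem (xs ++ [v]) 0 h0 (by simp; omega),
      PySem.List.pyGetD_eq_getElem xs 0 h0 (by simpa using h1)]
  exact List.getElem_append_left (by omega)

theorem stepA_append (xs : List Int) (v : Int) (vt at' : Int) (s : Bool × Int × List Int × List Int) :
    (PySem.List.pyRange 0 (xs.length : Int) 1).foldl (stepA (xs ++ [v]) vt at') s
      = (PySem.List.pyRange 0 (xs.length : Int) 1).foldl (stepA xs vt at') s := by
  apply PySem.List.foldl_congr_mem
  intro acc i hi
  have := (PySem.List.mem_pyRange_one).1 hi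
  unfold stepA
  rw [pyGetD_append_left xs v i this.1 this.2]

-- the invariant: A's whole loop state is determined by the crossing-index list
theorem inv (vt at' : Int) (x : List Int) :
    (∀ i ∈ idxsOf x vt, 0 ≤ i ∧ i < (x.length : Int)) ∧
    (PySem.List.pyRange 0 (x.length : Int) 1).foldl (stepA x vt at') (false, 0, [], [])
      = (!(idxsOf x vt).isEmpty, PySem.List.pyGetD (idxsOf x vt) (-1) 0,
         segAge x.length (idxsOf x vt),
         (segAge x.length (idxsOf x vt)).map (fun a => if a = -1 ∨ a ≥ at' then 1 else 0)) := by
  induction x using List.reverseRecOn with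
  | nil =>
    simp [PySem.List.pyRange_one_eq_nil, idxsOf, segAge, PySem.List.pyGetD, PySem.List.pyGet?]
  | append_singleton xs v ih =>
    obtain ⟨hbd, heq⟩ := ih
    have hrange : PySem.List.pyRange 0 ((xs ++ [v]).length : Int) 1
        = PySem.List.pyRange 0 (xs.length : Int) 1 ++ [(xs.length : Int)] := by
      have := PySem.List.pyRange_one_succ_right (a := 0) (b := (xs.length : Int)) (by positivity)
      simpa using this
    have hget : PySem.List.pyGetD (xs ++ [v]) (xs.length : Int) 0 = v := by
      rw [PySem.List.pyGetD_eq_getElem _ 0 (by positivity) (by simp)]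
      simp
    have hIdx := idxsOf_append xs v vt
    have hgetnil : PySem.List.pyGetD ([] : List Int) (-1) 0 = 0 := rfl
    refine ⟨?_, ?_⟩
    · intro i hi
      rw [hIdx] at hi
      rcases List.mem_append.1 hi with h | h
      · have := hbd i h; exact ⟨this.1, by simp; omega⟩
      · split_ifs at h <;> simp_all
    · rw [hrange, List.foldl_append, stepA_append, heq]
      simp only [List.foldl_cons, List.foldl_nil]
      unfold stepA
      simp only [hget, hIdx]
      by_cases hv : v > vt
      · -- a crossing at index n: idxs gains n at the end
        simp only [if_pos hv]
        cases hL : idxsOf xs vt with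
        | nil =>
          have hget1 : PySem.List.pyGetD [(xs.length : Int)] (-1) 0 = (xs.length : Int) := by
            rw [PySem.List.pyGetD_neg_one (h := by simp)]; rfl
          have hsegnil : segAge xs.length ([] : List Int) = List.replicate xs.length (-1) := rfl
          have hseg : segAge (xs.length + 1) [(xs.length : Int)]
              = List.replicate xs.length (-1) ++ [0] := by
            simp only [segAge, hget1]
            have h1 : ((xs.length + 1 : Nat) : Int) - (xs.length : Int) = 0 + 1 := by
              push_cast; ring
            rw [h1, PySem.List.pyRange_one_singleton]
            simp
          simp [hget1, hsegnil, hseg]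
        | cons i0 rest =>
          rw [hL] at hbd
          have hmem : PySem.List.pyGetD (i0 :: rest) (-1) 0 ∈ (i0 :: rest) := by
            rw [PySem.List.pyGetD_neg_one (h := by simp)]; exact List.getLast_mem _
          have hlt := (hbd _ hmem).2
          have hget2 : PySem.List.pyGetD (i0 :: (rest ++ [(xs.length : Int)])) (-1) 0
              = (xs.length : Int) := by
            rw [← List.cons_append, PySem.List.pyGetD_neg_one_append_singleton]
          have hzip : (i0 :: (rest ++ [(xs.length : Int)])).zip
                        (i0 :: (rest ++ [(xs.length : Int)])).tail
              = (i0 :: rest).zip (i0 :: rest).tail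
                ++ [(PySem.List.pyGetD (i0 :: rest) (-1) 0, (xs.length : Int))] := by
            have := pairs_append (i0 :: rest) (xs.length : Int) (by simp)
            simpa using this
          have hseg : segAge (xs.length + 1) (i0 :: (rest ++ [(xs.length : Int)]))
              = segAge xs.length (i0 :: rest) ++ [0] := by
            simp only [segAge, hget2, hzip, List.foldl_append, List.foldl_cons, List.foldl_nil]
            have h1 : ((xs.length + 1 : Nat) : Int) - (xs.length : Int) = 0 + 1 := by
              push_cast; ring
            rw [h1, PySem.List.pyRange_one_singleton]
            try simp [List.append_assoc]
          simp [hget2, hseg]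
      · -- no crossing at n: idxs unchanged, running age grows by one (or stays -1)
        simp only [if_neg hv, List.append_nil]
        cases hL : idxsOf xs vt with
        | nil =>
          have hsegnil : segAge xs.length ([] : List Int) = List.replicate xs.length (-1) := rfl
          have hseg : segAge (xs.length + 1) ([] : List Int)
              = List.replicate xs.length (-1) ++ [-1] := by
            simp [segAge, List.replicate_succ']
          simp [hgetnil, hsegnil, hseg]
        | cons i0 rest =>
          rw [hL] at hbd
          have hmem : PySem.List.pyGetD (i0 :: rest) (-1) 0 ∈ (i0 :: rest) := by
            rw [PySem.List.pyGetD_neg_one (h := by simp)]; exact List.getLast_mem _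
          have hlt := (hbd _ hmem).2
          have hseg : segAge (xs.length + 1) (i0 :: rest)
              = segAge xs.length (i0 :: rest)
                ++ [(xs.length : Int) - PySem.List.pyGetD (i0 :: rest) (-1) 0] := by
            simp only [segAge]
            have h2 : ((xs.length + 1 : Nat) : Int) - PySem.List.pyGetD (i0 :: rest) (-1) 0
                = ((xs.length : Int) - PySem.List.pyGetD (i0 :: rest) (-1) 0) + 1 := by
              push_cast; ring
            rw [h2, PySem.List.pyRange_one_succ_right (by omega)]
            simp [List.append_assoc]
          have hne : ¬((xs.length : Int) - PySem.List.pyGetD (i0 :: rest) (-1) 0 = -1) := by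
            omega
          simp [hseg, hne]

-- ===== VERDICT (by name: the statement is the Claim_ definition above) =====
theorem since_thresh_spec : Claim_equal_since_thresh := by
  intro x vt at' _
  unfold Spec_since_thresh since_thresh
  rw [(inv vt at' x).2, alt_eq]
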